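-- pv_equiv track=rewrite | github.com/BrennanB/slff-draftrunner | Draft.py | setup_draft
-- ===== SOURCE A (Python) =====
-- def time_math(hour, minute, additions, margin):
--     if margin == 0:
--         return None
--     else:
--         for i in range(0, additions):
--             minute += margin
--             if minute >= 60:
--                 hour += 1
--                 minute -= 60
--         if minute < 10:
--             string_minute = "0" + str(minute)
--         else:
--             string_minute = minute
--     return "{}:{}".format(hour, string_minute), hour, minute
--
-- def setup_draft(start_hour, start_minute, players, ROUND_TIMING):
--     number_of_teams = len(players)
--     r2_stats = time_math(start_hour, start_minute, number_of_teams - 1, ROUND_TIMING[0])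
--     r3_stats = time_math(r2_stats[1], r2_stats[2], number_of_teams + 1, ROUND_TIMING[1])
--     table = []
--     i = 0
--     for player in players:
--         team_setup = [player, time_math(start_hour, start_minute, i, ROUND_TIMING[0])[0],
--                       time_math(r2_stats[1], r2_stats[2], (number_of_teams - i), ROUND_TIMING[1])[0],
--                       time_math(r3_stats[1], r3_stats[2], i, ROUND_TIMING[2])[0], "*Live Picking*", "", ""]
--         table.append(team_setup)
--         i += 1
--     return table
-- ===== SOURCE B (Python) =====
-- def setup_draft(start_hour, start_minute, players, ROUND_TIMING):
--     # O(n): three incremental clock chains instead of recomputing each pick time from the start.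
--     if not players:
--         return []
--     n = len(players)
--     g0, g1, g2 = ROUND_TIMING[0], ROUND_TIMING[1], ROUND_TIMING[2]
--
--     def step(hm, g):
--         h, m = hm
--         m += g
--         if m >= 60:
--             return h + 1, m - 60
--         return h, m
--
--     def states(s, g, k):
--         out = []
--         for _ in range(k):
--             out.append(s)
--             s = step(s, g)
--         return out
--
--     def fmt(hm):
--         h, m = hm
--         return "{}:{}".format(h, "0" + str(m) if m < 10 else m)
--
--     c1 = states((start_hour, start_minute), g0, n)      # round-1 pick times
--     t2 = states(c1[-1], g1, n + 2)                       # round-2 clock, n+1 steps past its start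
--     c3 = states(t2[-1], g2, n)                           # round-3 pick times
--     return [[p, fmt(c1[i]), fmt(t2[n - i]), fmt(c3[i]), "*Live Picking*", "", ""]
--             for i, p in enumerate(players)]
-- ===== Notes on version B (the rewrite author's own statement) =====
-- stated objective: faster
-- what changed: B replaces A's per-player restart of the minute-adding loop (time_math recomputed from the round start for every pick) by three incrementally-stepped clock chains computed once, indexed per player.
import Mathlib
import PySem

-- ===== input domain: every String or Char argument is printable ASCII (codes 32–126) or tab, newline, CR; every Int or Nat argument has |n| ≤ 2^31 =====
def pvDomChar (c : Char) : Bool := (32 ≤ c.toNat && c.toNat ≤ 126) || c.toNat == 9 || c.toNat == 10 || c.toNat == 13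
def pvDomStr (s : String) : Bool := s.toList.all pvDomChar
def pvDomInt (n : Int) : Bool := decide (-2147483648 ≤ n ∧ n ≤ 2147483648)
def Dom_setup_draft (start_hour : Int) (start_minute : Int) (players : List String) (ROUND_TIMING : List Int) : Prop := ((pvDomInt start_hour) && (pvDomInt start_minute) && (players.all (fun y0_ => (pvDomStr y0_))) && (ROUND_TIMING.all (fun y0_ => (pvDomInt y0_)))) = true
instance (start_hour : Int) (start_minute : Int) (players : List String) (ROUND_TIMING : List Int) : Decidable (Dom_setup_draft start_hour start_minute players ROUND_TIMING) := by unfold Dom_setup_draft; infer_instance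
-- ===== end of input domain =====

-- B computes the three per-round clock chains once by incremental stepping (O(n)) instead of
-- re-running A's minute-adding loop from the round start for every player (O(n^2)).


-- ===== PORT A =====
-- time_math: None when margin == 0, else the formatted time plus the hour/minute after `additions` loop steps.
def time_math (hour : Int) (minute : Int) (additions : Int) (margin : Int) : Option (String × Int × Int) :=
  if margin = 0 then none
  else
    let st := (PySem.List.pyRange 0 additions 1).foldl
      (fun (hm : Int × Int) _ =>
        let m := hm.2 + margin
        if 60 ≤ m then (hm.1 + 1, m - 60) else (hm.1, m)) (hour, minute)
    let string_minute := if st.2 < 10 then "0" ++ PySem.Int.toStr st.2 else PySem.Int.toStr st.2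
    some (PySem.Int.toStr st.1 ++ ":" ++ string_minute, st.1, st.2)

-- Where Python raises (IndexError on ROUND_TIMING, TypeError on subscripting None) the port returns
-- [] / "" — those inputs are excluded by Pre_setup_draft.
def setup_draft (start_hour : Int) (start_minute : Int) (players : List String) (ROUND_TIMING : List Int) : List (List String) :=
  let number_of_teams : Int := players.length
  match PySem.List.pyGet? ROUND_TIMING 0 with
  | none => []
  | some rt0 =>
    match time_math start_hour start_minute (number_of_teams - 1) rt0 with
    | none => []
    | some r2_stats =>
      match PySem.List.pyGet? ROUND_TIMING 1 with
      | none => []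
      | some rt1 =>
        let r3? := time_math r2_stats.2.1 r2_stats.2.2 (number_of_teams + 1) rt1
        let res := players.foldl
          (fun (st : List (List String) × Int) player =>
            let team_setup : List String :=
              [player,
               ((time_math start_hour start_minute st.2 rt0).map (·.1)).getD "",
               ((time_math r2_stats.2.1 r2_stats.2.2 (number_of_teams - st.2) rt1).map (·.1)).getD "",
               (match r3?, PySem.List.pyGet? ROUND_TIMING 2 with
                | some r3_stats, some rt2 =>
                    ((time_math r3_stats.2.1 r3_stats.2.2 st.2 rt2).map (·.1)).getD ""
                | _, _ => ""),
               "*Live Picking*", "", ""]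
            (st.1 ++ [team_setup], st.2 + 1)) ([], 0)
        res.1

-- ===== PORT B =====
def pvStep (hm : Int × Int) (g : Int) : Int × Int :=
  let m := hm.2 + g
  if 60 ≤ m then (hm.1 + 1, m - 60) else (hm.1, m)

-- states(s, g, k): the k clock states s, step s, step (step s), …
def pvStates (s : Int × Int) (g : Int) (k : Nat) : List (Int × Int) :=
  match k with
  | 0 => []
  | Nat.succ k => s :: pvStates (pvStep s g) g k

def pvFmt (hm : Int × Int) : String :=
  PySem.Int.toStr hm.1 ++ ":" ++
    (if hm.2 < 10 then "0" ++ PySem.Int.toStr hm.2 else PySem.Int.toStr hm.2)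

def setup_draft_alt (start_hour : Int) (start_minute : Int) (players : List String) (ROUND_TIMING : List Int) : List (List String) :=
  if players = [] then []
  else
    let n := players.length
    -- Source B raises IndexError when ROUND_TIMING is shorter than 3; total default here (outside Pre_)
    let g0 := ROUND_TIMING.getD 0 0
    let g1 := ROUND_TIMING.getD 1 0
    let g2 := ROUND_TIMING.getD 2 0
    let c1 := pvStates (start_hour, start_minute) g0 n
    let t2 := pvStates (PySem.List.pyGetD c1 (-1) (0, 0)) g1 (n + 2)
    let c3 := pvStates (PySem.List.pyGetD t2 (-1) (0, 0)) g2 n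
    (PySem.List.enumerate players 0).map (fun ip =>
      [ip.2, pvFmt (PySem.List.pyGetD c1 ip.1 (0, 0)),
       pvFmt (PySem.List.pyGetD t2 ((n : Int) - ip.1) (0, 0)),
       pvFmt (PySem.List.pyGetD c3 ip.1 (0, 0)), "*Live Picking*", "", ""])

-- ===== PRECONDITION & SPEC =====
-- Pre_ excludes exactly the inputs where A raises: a ROUND_TIMING too short for the indices A reads
-- (IndexError), or a zero margin making time_math return None that A then subscripts (TypeError).
def Pre_setup_draft (start_hour : Int) (start_minute : Int) (players : List String) (ROUND_TIMING : List Int) : Prop :=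
  (players = [] ∧ 2 ≤ ROUND_TIMING.length ∧ ROUND_TIMING.getD 0 0 ≠ 0) ∨
  (players ≠ [] ∧ 3 ≤ ROUND_TIMING.length ∧ ROUND_TIMING.getD 0 0 ≠ 0 ∧
    ROUND_TIMING.getD 1 0 ≠ 0 ∧ ROUND_TIMING.getD 2 0 ≠ 0)
instance (start_hour : Int) (start_minute : Int) (players : List String) (ROUND_TIMING : List Int) : Decidable (Pre_setup_draft start_hour start_minute players ROUND_TIMING) := by unfold Pre_setup_draft; infer_instance

def pvWitness_setup_draft : Int × Int × List String × List Int := (9, 50, ["a", "b"], [5, 3, 4])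

def Spec_setup_draft (start_hour : Int) (start_minute : Int) (players : List String) (ROUND_TIMING : List Int) (out : List (List String)) : Prop := out = setup_draft_alt start_hour start_minute players ROUND_TIMING
instance (start_hour : Int) (start_minute : Int) (players : List String) (ROUND_TIMING : List Int) (out : List (List String)) : Decidable (Spec_setup_draft start_hour start_minute players ROUND_TIMING out) := by unfold Spec_setup_draft; infer_instance

-- ===== CLAIM (what is proved, stated in full; the proofs are below) =====
def Claim_equal_setup_draft : Prop := ∀ (start_hour : Int) (start_minute : Int) (players : List String) (ROUND_TIMING : List Int), Dom_setup_draft start_hour start_minute players ROUND_TIMING → Pre_setup_draft start_hour start_minute players ROUND_TIMING → Spec_setup_draft start_hour start_minute players ROUND_TIMING (setup_draft start_hour start_minute players ROUND_TIMING)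

-- ===== LEMMAS AND PROOFS =====

-- the clock state after k steps
def pvStepN (s : Int × Int) (g : Int) : Nat → Int × Int
  | 0 => s
  | Nat.succ k => pvStep (pvStepN s g k) g

theorem pvStepN_shift (s : Int × Int) (g : Int) (k : Nat) :
    pvStepN s g (k + 1) = pvStepN (pvStep s g) g k := by
  induction k with
  | zero => rfl
  | succ k ih => show pvStep (pvStepN s g (k+1)) g = _; rw [ih]; rfl

theorem pvStates_length (s : Int × Int) (g : Int) (k : Nat) :
    (pvStates s g k).length = k := by
  induction k generalizing s with
  | zero => rfl
  | succ k ih => simp [pvStates, ih]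

theorem pvStates_getElem (s : Int × Int) (g : Int) (k i : Nat) (hi : i < k)
    (h : i < (pvStates s g k).length) :
    (pvStates s g k)[i] = pvStepN s g i := by
  induction k generalizing s i with
  | zero => omega
  | succ k ih =>
    cases i with
    | zero => rfl
    | succ i =>
      show (pvStates (pvStep s g) g k)[i]'(by simpa [pvStates_length] using hi) = _
      rw [ih (pvStep s g) i (by omega), pvStepN_shift]

theorem pvStates_pyGetD (s : Int × Int) (g : Int) (k i : Nat) (hi : i < k) :
    PySem.List.pyGetD (pvStates s g k) (i : Int) (0, 0) = pvStepN s g i := by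
  rw [PySem.List.pyGetD_eq_getElem _ _ (by omega)
        (by rw [pvStates_length]; omega)]
  simpa using pvStates_getElem s g k i hi (by rw [pvStates_length]; omega)

theorem pvStates_last (s : Int × Int) (g : Int) (k : Nat) (hk : 0 < k) :
    PySem.List.pyGetD (pvStates s g k) (-1) (0, 0) = pvStepN s g (k - 1) := by
  have hne : pvStates s g k ≠ [] := by
    intro h
    have := pvStates_length s g k
    rw [h] at this
    simp at this; omega
  rw [PySem.List.pyGetD_neg_one _ _ hne, List.getLast_eq_getElem]
  simp only [pvStates_length]
  exact pvStates_getElem s g k (k - 1) (by omega) (by rw [pvStates_length]; omega)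

theorem foldl_pvStep (g : Int) (l : List Int) (s : Int × Int) :
    l.foldl (fun (hm : Int × Int) _ =>
      let m := hm.2 + g
      if 60 ≤ m then (hm.1 + 1, m - 60) else (hm.1, m)) s = pvStepN s g l.length := by
  induction l generalizing s with
  | nil => rfl
  | cons x l ih =>
    show l.foldl _ (pvStep s g) = _
    rw [ih (pvStep s g), List.length_cons, pvStepN_shift]

theorem time_math_eq (h m g : Int) (k : Nat) (hg : g ≠ 0) :
    time_math h m (k : Int) g =
      some (pvFmt (pvStepN (h, m) g k), (pvStepN (h, m) g k).1, (pvStepN (h, m) g k).2) := by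
  unfold time_math
  rw [if_neg hg, foldl_pvStep g _ (h, m)]
  have hl : (PySem.List.pyRange 0 (k : Int) 1).length = k := by
    rw [PySem.List.length_pyRange_one]; simp
  rw [hl]; rfl

-- the table-building foldl of A, as a map over enumerate
theorem foldl_rows (row : String → Int → List String) :
    ∀ (ps : List String) (acc : List (List String)) (i0 : Int),
    (ps.foldl (fun (st : List (List String) × Int) player =>
        (st.1 ++ [row player st.2], st.2 + 1)) (acc, i0)).1
      = acc ++ (PySem.List.enumerate ps i0).map (fun ip => row ip.2 ip.1) := by
  intro ps
  induction ps with
  | nil => intro acc i0; simp [PySem.List.enumerate_nil]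
  | cons p ps ih =>
    intro acc i0
    show (ps.foldl _ (acc ++ [row p i0], i0 + 1)).1 = _
    rw [ih (acc ++ [row p i0]) (i0 + 1), PySem.List.enumerate_cons]
    simp

theorem setup_draft_spec : Claim_equal_setup_draft := by
  intro sh sm players RT _ hpre
  unfold Spec_setup_draft
  rcases hpre with ⟨hnil, hlen, h0⟩ | ⟨hne, hlen, h0, h1, h2⟩
  · -- players = []
    subst hnil
    have e0 : PySem.List.pyGet? RT 0 = some (RT.getD 0 0) := by
      rw [PySem.List.pyGet?_eq_some_getElem RT (by omega) (by push_cast; omega)]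
      rw [List.getD_eq_getElem RT _ (by omega)]
      rfl
    have e1 : PySem.List.pyGet? RT 1 = some (RT.getD 1 0) := by
      rw [PySem.List.pyGet?_eq_some_getElem RT (by omega) (by push_cast; omega)]
      rw [List.getD_eq_getElem RT _ (by omega)]
      rfl
    have htm : time_math sh sm (0 - 1) (RT.getD 0 0) =
        some (pvFmt (sh, sm), sh, sm) := by
      unfold time_math
      rw [if_neg h0, PySem.List.pyRange_one_eq_nil (by omega)]
      rfl
    have hB : setup_draft_alt sh sm [] RT = [] := by simp [setup_draft_alt]
    rw [hB]
    unfold setup_draft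
    simp only [List.length_nil, Nat.cast_zero, e0, e1, htm, List.foldl_nil]
  · -- players ≠ []
    have hn : 0 < players.length := List.length_pos_iff.mpr hne
    have e0 : PySem.List.pyGet? RT 0 = some (RT.getD 0 0) := by
      rw [PySem.List.pyGet?_eq_some_getElem RT (by omega) (by push_cast; omega)]
      rw [List.getD_eq_getElem RT _ (by omega)]
      rfl
    have e1 : PySem.List.pyGet? RT 1 = some (RT.getD 1 0) := by
      rw [PySem.List.pyGet?_eq_some_getElem RT (by omega) (by push_cast; omega)]
      rw [List.getD_eq_getElem RT _ (by omega)]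
      rfl
    have e2 : PySem.List.pyGet? RT 2 = some (RT.getD 2 0) := by
      rw [PySem.List.pyGet?_eq_some_getElem RT (by omega) (by push_cast; omega)]
      rw [List.getD_eq_getElem RT _ (by omega)]
      rfl
    unfold setup_draft setup_draft_alt
    rw [if_neg hne]
    simp only [e0, e1, e2]
    set g0 := RT.getD 0 0 with hg0
    set g1 := RT.getD 1 0 with hg1
    set g2 := RT.getD 2 0 with hg2
    set n := players.length with hn_def
    have er2 : time_math sh sm ((n : Int) - 1) g0 =
        some (pvFmt (pvStepN (sh, sm) g0 (n - 1)),
              (pvStepN (sh, sm) g0 (n - 1)).1, (pvStepN (sh, sm) g0 (n - 1)).2) := by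
      have hc : ((n : Int) - 1) = ((n - 1 : Nat) : Int) := by omega
      rw [hc, time_math_eq _ _ _ _ h0]
    rw [er2]
    set S2 := pvStepN (sh, sm) g0 (n - 1) with hS2
    have er3 : time_math S2.1 S2.2 ((n : Int) + 1) g1 =
        some (pvFmt (pvStepN (S2.1, S2.2) g1 (n + 1)),
              (pvStepN (S2.1, S2.2) g1 (n + 1)).1, (pvStepN (S2.1, S2.2) g1 (n + 1)).2) := by
      have hc : ((n : Int) + 1) = ((n + 1 : Nat) : Int) := by omega
      rw [hc, time_math_eq _ _ _ _ h1]
    have hS2p : (S2.1, S2.2) = S2 := rfl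
    rw [hS2p] at er3
    set S3 := pvStepN S2 g1 (n + 1) with hS3
    have hmatch : ∀ i : Int,
        (match time_math S2.1 S2.2 ((n : Int) + 1) g1, some g2 with
         | some r3_stats, some rt2 =>
             ((time_math r3_stats.2.1 r3_stats.2.2 i rt2).map (·.1)).getD ""
         | _, _ => "") = ((time_math S3.1 S3.2 i g2).map (·.1)).getD "" := by
      intro i; rw [er3]
    simp only [hmatch]
    rw [foldl_rows (fun player i =>
      [player,
       ((time_math sh sm i g0).map (·.1)).getD "",
       ((time_math S2.1 S2.2 ((n : Int) - i) g1).map (·.1)).getD "",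
       ((time_math S3.1 S3.2 i g2).map (·.1)).getD "",
       "*Live Picking*", "", ""]) players [] 0]
    rw [List.nil_append]
    rw [pvStates_last (sh, sm) g0 n hn, ← hS2,
        pvStates_last S2 g1 (n + 2) (by omega)]
    have hidx : n + 2 - 1 = n + 1 := by omega
    rw [hidx, ← hS3]
    apply List.map_congr_left
    intro ip hip
    rcases (PySem.List.mem_enumerate_iff _ _ _).mp hip with ⟨k, hk, rfl⟩
    simp only [Int.zero_add]
    have hf1 := time_math_eq sh sm g0 k h0
    have hf2 : time_math S2.1 S2.2 ((n : Int) - (k : Int)) g1 =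
        some (pvFmt (pvStepN (S2.1, S2.2) g1 (n - k)),
              (pvStepN (S2.1, S2.2) g1 (n - k)).1, (pvStepN (S2.1, S2.2) g1 (n - k)).2) := by
      have hc : ((n : Int) - (k : Int)) = ((n - k : Nat) : Int) := by omega
      rw [hc, time_math_eq _ _ _ _ h1]
    rw [hS2p] at hf2
    have hf3 := time_math_eq S3.1 S3.2 g2 k h2
    have hS3p : (S3.1, S3.2) = S3 := rfl
    rw [hS3p] at hf3
    rw [hf1, hf2, hf3]
    rw [pvStates_pyGetD (sh, sm) g0 n k hk]
    have hnk : PySem.List.pyGetD (pvStates S2 g1 (n + 2)) ((n : Int) - (k : Int)) (0, 0)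
        = pvStepN S2 g1 (n - k) := by
      have hc : ((n : Int) - (k : Int)) = ((n - k : Nat) : Int) := by omega
      rw [hc]; exact pvStates_pyGetD S2 g1 (n + 2) (n - k) (by omega)
    rw [hnk, pvStates_pyGetD S3 g2 n k hk]
    rfl
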